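-- pv_equiv track=rewrite | github.com/yang1955316899/FlowKit | src/utils/keyboard.py | vk_list_to_str
-- ===== SOURCE A (Python) =====
-- VK_NAMES = {
--     0x08: 'backspace', 0x09: 'tab', 0x0D: 'enter', 0x1B: 'esc',
--     0x20: 'space', 0x21: 'pageup', 0x22: 'pagedown',
--     0x23: 'end', 0x24: 'home',
--     0x25: 'left', 0x26: 'up', 0x27: 'right', 0x28: 'down',
--     0x2C: 'printscreen', 0x2D: 'insert', 0x2E: 'delete',
--     0x5B: 'win',
--     0x70: 'f1', 0x71: 'f2', 0x72: 'f3', 0x73: 'f4',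
--     0x74: 'f5', 0x75: 'f6', 0x76: 'f7', 0x77: 'f8',
--     0x78: 'f9', 0x79: 'f10', 0x7A: 'f11', 0x7B: 'f12',
--     0x10: 'shift', 0x11: 'ctrl', 0x12: 'alt',
--     0xA0: 'shift', 0xA1: 'shift',  # L/R shift
--     0xA2: 'ctrl', 0xA3: 'ctrl',    # L/R ctrl
--     0xA4: 'alt', 0xA5: 'alt',      # L/R alt
-- }
--
-- def vk_list_to_str(vk_codes: list[int]) -> str:
--     """将虚拟键码列表转换为按键字符串
--
--     Args:
--         vk_codes: 虚拟键码列表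
--
--     Returns:
--         按键组合字符串，如 'ctrl+c'
--     """
--     parts = []
--     modifiers = {0x10, 0x11, 0x12, 0x5B, 0xA0, 0xA1, 0xA2, 0xA3, 0xA4, 0xA5}
--     mod_parts = []
--     key_parts = []
--
--     for vk in vk_codes:
--         name = VK_NAMES.get(vk)
--         if name:
--             if vk in modifiers:
--                 if name not in mod_parts:
--                     mod_parts.append(name)
--             else:
--                 key_parts.append(name)
--         elif 0x30 <= vk <= 0x39:  # 0-9
--             key_parts.append(chr(vk))
--         elif 0x41 <= vk <= 0x5A:  # A-Z
--             key_parts.append(chr(vk).lower())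
--
--     parts = mod_parts + key_parts
--     return '+'.join(parts) if parts else ''
-- ===== SOURCE B (Python) =====
-- VK_NAMES = {
--     0x08: 'backspace', 0x09: 'tab', 0x0D: 'enter', 0x1B: 'esc',
--     0x20: 'space', 0x21: 'pageup', 0x22: 'pagedown',
--     0x23: 'end', 0x24: 'home',
--     0x25: 'left', 0x26: 'up', 0x27: 'right', 0x28: 'down',
--     0x2C: 'printscreen', 0x2D: 'insert', 0x2E: 'delete',
--     0x5B: 'win',
--     0x70: 'f1', 0x71: 'f2', 0x72: 'f3', 0x73: 'f4',
--     0x74: 'f5', 0x75: 'f6', 0x76: 'f7', 0x77: 'f8',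
--     0x78: 'f9', 0x79: 'f10', 0x7A: 'f11', 0x7B: 'f12',
--     0x10: 'shift', 0x11: 'ctrl', 0x12: 'alt',
--     0xA0: 'shift', 0xA1: 'shift',
--     0xA2: 'ctrl', 0xA3: 'ctrl',
--     0xA4: 'alt', 0xA5: 'alt',
-- }
--
-- MODIFIER_NAMES = {'shift', 'ctrl', 'alt', 'win'}
--
--
-- def _resolve(vk):
--     """Map one virtual-key code to its key name, or None if unknown."""
--     name = VK_NAMES.get(vk)
--     if name is not None:
--         return name
--     if 0x30 <= vk <= 0x39:
--         return chr(vk)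
--     if 0x41 <= vk <= 0x5A:
--         return chr(vk).lower()
--     return None
--
--
-- def vk_list_to_str(vk_codes: list[int]) -> str:
--     # Traverse RIGHT-TO-LEFT, building both parts back-to-front.
--     # Modifier dedup is move-to-front: a more-left occurrence hoists the
--     # name to the head and drops the later copy, so the final modifier
--     # order is first-occurrence order without any 'seen' lookup.
--     mods = []
--     keys = []
--     for vk in reversed(vk_codes):
--         n = _resolve(vk)
--         if n is None:
--             continue
--         if n in MODIFIER_NAMES:
--             mods = [n] + [m for m in mods if m != n]
--         else:
--             keys.append(n)
--     keys.reverse()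
--     return '+'.join(mods + keys)
-- ===== Notes on version B (the rewrite author's own statement) =====
-- stated objective: alternative
-- what changed: B traverses the list right-to-left building the result back-to-front: modifiers are deduplicated by move-to-front (a leftward occurrence hoists the name and evicts the later copy) instead of A's forward seen-list append, and keys are collected reversed then flipped once; join of the empty list already yields ''.
import Mathlib
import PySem

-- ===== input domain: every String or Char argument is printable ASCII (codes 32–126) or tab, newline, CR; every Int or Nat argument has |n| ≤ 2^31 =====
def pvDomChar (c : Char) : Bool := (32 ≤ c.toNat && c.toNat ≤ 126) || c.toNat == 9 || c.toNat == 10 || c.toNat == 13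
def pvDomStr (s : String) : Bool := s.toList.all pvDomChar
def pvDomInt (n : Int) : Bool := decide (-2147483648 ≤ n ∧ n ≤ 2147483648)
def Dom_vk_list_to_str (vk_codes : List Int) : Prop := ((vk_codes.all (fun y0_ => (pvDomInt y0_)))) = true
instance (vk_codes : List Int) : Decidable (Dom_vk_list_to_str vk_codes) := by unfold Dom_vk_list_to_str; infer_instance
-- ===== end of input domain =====

-- B traverses right-to-left building the result back-to-front, with move-to-front dedup of modifiers (alternative decomposition, same values).

-- ===== PORT A =====
-- VK_NAMES.get(vk): the literal dict, as a first-match lookup chain (exact: all keys distinct)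
def vkName? (vk : Int) : Option String :=
  if vk = 0x08 then some "backspace" else if vk = 0x09 then some "tab"
  else if vk = 0x0D then some "enter" else if vk = 0x1B then some "esc"
  else if vk = 0x20 then some "space" else if vk = 0x21 then some "pageup"
  else if vk = 0x22 then some "pagedown" else if vk = 0x23 then some "end"
  else if vk = 0x24 then some "home" else if vk = 0x25 then some "left"
  else if vk = 0x26 then some "up" else if vk = 0x27 then some "right"
  else if vk = 0x28 then some "down" else if vk = 0x2C then some "printscreen"
  else if vk = 0x2D then some "insert" else if vk = 0x2E then some "delete"
  else if vk = 0x5B then some "win"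
  else if vk = 0x70 then some "f1" else if vk = 0x71 then some "f2"
  else if vk = 0x72 then some "f3" else if vk = 0x73 then some "f4"
  else if vk = 0x74 then some "f5" else if vk = 0x75 then some "f6"
  else if vk = 0x76 then some "f7" else if vk = 0x77 then some "f8"
  else if vk = 0x78 then some "f9" else if vk = 0x79 then some "f10"
  else if vk = 0x7A then some "f11" else if vk = 0x7B then some "f12"
  else if vk = 0x10 then some "shift" else if vk = 0x11 then some "ctrl"
  else if vk = 0x12 then some "alt"
  else if vk = 0xA0 then some "shift" else if vk = 0xA1 then some "shift"
  else if vk = 0xA2 then some "ctrl" else if vk = 0xA3 then some "ctrl"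
  else if vk = 0xA4 then some "alt" else if vk = 0xA5 then some "alt"
  else none

-- 'vk in modifiers' (the set literal)
def vkIsMod (vk : Int) : Bool :=
  vk == 0x10 || vk == 0x11 || vk == 0x12 || vk == 0x5B || vk == 0xA0 ||
  vk == 0xA1 || vk == 0xA2 || vk == 0xA3 || vk == 0xA4 || vk == 0xA5

-- chr(vk) for vk in the ASCII ranges used (48..57, 65..90)
def vkChr (vk : Int) : String := String.mk [Char.ofNat vk.toNat]

-- A's loop body over the state (mod_parts, key_parts); 'if name:' = 'name is not None' (all dict values non-empty)
def vkStepA (s : List String × List String) (vk : Int) : List String × List String :=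
  match vkName? vk with
  | some name =>
      if vkIsMod vk then (if name ∈ s.1 then s else (s.1 ++ [name], s.2))
      else (s.1, s.2 ++ [name])
  | none =>
      if 0x30 ≤ vk ∧ vk ≤ 0x39 then (s.1, s.2 ++ [vkChr vk])
      else if 0x41 ≤ vk ∧ vk ≤ 0x5A then (s.1, s.2 ++ [PySem.Str.lower (vkChr vk)])
      else s

def vk_list_to_str (vk_codes : List Int) : String :=
  let st := vk_codes.foldl vkStepA ([], [])
  let parts := st.1 ++ st.2
  if parts = [] then "" else PySem.Str.join "+" parts

-- ===== PORT B =====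
-- _resolve: dict lookup, else the two chr ranges, else None
def vkResolve (vk : Int) : Option String :=
  match vkName? vk with
  | some n => some n
  | none =>
      if 0x30 ≤ vk ∧ vk ≤ 0x39 then some (vkChr vk)
      else if 0x41 ≤ vk ∧ vk ≤ 0x5A then some (PySem.Str.lower (vkChr vk))
      else none

-- 'n in MODIFIER_NAMES'
def isModName (n : String) : Bool := n == "shift" || n == "ctrl" || n == "alt" || n == "win"

-- the loop body of B's reversed pass: move-to-front for modifiers, append for keys
def vkGoStep (s : List String × List String) (vk : Int) : List String × List String :=
  match vkResolve vk with
  | none => s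
  | some n =>
      if isModName n then (n :: s.1.filter (fun m => !(m == n)), s.2)
      else (s.1, s.2 ++ [n])

def vk_list_to_str_alt (vk_codes : List Int) : String :=
  let st := vk_codes.reverse.foldl vkGoStep ([], [])
  PySem.Str.join "+" (st.1 ++ st.2.reverse)

-- ===== PRECONDITION & SPEC =====
def Spec_vk_list_to_str (vk_codes : List Int) (out : String) : Prop := out = vk_list_to_str_alt vk_codes
instance (vk_codes : List Int) (out : String) : Decidable (Spec_vk_list_to_str vk_codes out) := by unfold Spec_vk_list_to_str; infer_instance

-- ===== CLAIM (what is proved, stated in full; the proofs are below) =====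
def Claim_equal_vk_list_to_str : Prop := ∀ (vk_codes : List Int), Dom_vk_list_to_str vk_codes → Spec_vk_list_to_str vk_codes (vk_list_to_str vk_codes)

-- ===== LEMMAS AND PROOFS =====

-- each table hit pairs a code with its name, and modifier status agrees on both sides
lemma vk_key_cases (vk : Int) :
    vkName? vk = none ∨ ∃ n, vkName? vk = some n ∧ vkIsMod vk = isModName n := by
  by_cases h0 : vk = 8
  · exact Or.inr ⟨"backspace", by rw [h0]; decide, by rw [h0]; decide⟩
  by_cases h1 : vk = 9
  · exact Or.inr ⟨"tab", by rw [h1]; decide, by rw [h1]; decide⟩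
  by_cases h2 : vk = 13
  · exact Or.inr ⟨"enter", by rw [h2]; decide, by rw [h2]; decide⟩
  by_cases h3 : vk = 27
  · exact Or.inr ⟨"esc", by rw [h3]; decide, by rw [h3]; decide⟩
  by_cases h4 : vk = 32
  · exact Or.inr ⟨"space", by rw [h4]; decide, by rw [h4]; decide⟩
  by_cases h5 : vk = 33
  · exact Or.inr ⟨"pageup", by rw [h5]; decide, by rw [h5]; decide⟩
  by_cases h6 : vk = 34
  · exact Or.inr ⟨"pagedown", by rw [h6]; decide, by rw [h6]; decide⟩
  by_cases h7 : vk = 35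
  · exact Or.inr ⟨"end", by rw [h7]; decide, by rw [h7]; decide⟩
  by_cases h8 : vk = 36
  · exact Or.inr ⟨"home", by rw [h8]; decide, by rw [h8]; decide⟩
  by_cases h9 : vk = 37
  · exact Or.inr ⟨"left", by rw [h9]; decide, by rw [h9]; decide⟩
  by_cases h10 : vk = 38
  · exact Or.inr ⟨"up", by rw [h10]; decide, by rw [h10]; decide⟩
  by_cases h11 : vk = 39
  · exact Or.inr ⟨"right", by rw [h11]; decide, by rw [h11]; decide⟩
  by_cases h12 : vk = 40
  · exact Or.inr ⟨"down", by rw [h12]; decide, by rw [h12]; decide⟩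
  by_cases h13 : vk = 44
  · exact Or.inr ⟨"printscreen", by rw [h13]; decide, by rw [h13]; decide⟩
  by_cases h14 : vk = 45
  · exact Or.inr ⟨"insert", by rw [h14]; decide, by rw [h14]; decide⟩
  by_cases h15 : vk = 46
  · exact Or.inr ⟨"delete", by rw [h15]; decide, by rw [h15]; decide⟩
  by_cases h16 : vk = 91
  · exact Or.inr ⟨"win", by rw [h16]; decide, by rw [h16]; decide⟩
  by_cases h17 : vk = 112
  · exact Or.inr ⟨"f1", by rw [h17]; decide, by rw [h17]; decide⟩
  by_cases h18 : vk = 113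
  · exact Or.inr ⟨"f2", by rw [h18]; decide, by rw [h18]; decide⟩
  by_cases h19 : vk = 114
  · exact Or.inr ⟨"f3", by rw [h19]; decide, by rw [h19]; decide⟩
  by_cases h20 : vk = 115
  · exact Or.inr ⟨"f4", by rw [h20]; decide, by rw [h20]; decide⟩
  by_cases h21 : vk = 116
  · exact Or.inr ⟨"f5", by rw [h21]; decide, by rw [h21]; decide⟩
  by_cases h22 : vk = 117
  · exact Or.inr ⟨"f6", by rw [h22]; decide, by rw [h22]; decide⟩
  by_cases h23 : vk = 118
  · exact Or.inr ⟨"f7", by rw [h23]; decide, by rw [h23]; decide⟩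
  by_cases h24 : vk = 119
  · exact Or.inr ⟨"f8", by rw [h24]; decide, by rw [h24]; decide⟩
  by_cases h25 : vk = 120
  · exact Or.inr ⟨"f9", by rw [h25]; decide, by rw [h25]; decide⟩
  by_cases h26 : vk = 121
  · exact Or.inr ⟨"f10", by rw [h26]; decide, by rw [h26]; decide⟩
  by_cases h27 : vk = 122
  · exact Or.inr ⟨"f11", by rw [h27]; decide, by rw [h27]; decide⟩
  by_cases h28 : vk = 123
  · exact Or.inr ⟨"f12", by rw [h28]; decide, by rw [h28]; decide⟩
  by_cases h29 : vk = 16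
  · exact Or.inr ⟨"shift", by rw [h29]; decide, by rw [h29]; decide⟩
  by_cases h30 : vk = 17
  · exact Or.inr ⟨"ctrl", by rw [h30]; decide, by rw [h30]; decide⟩
  by_cases h31 : vk = 18
  · exact Or.inr ⟨"alt", by rw [h31]; decide, by rw [h31]; decide⟩
  by_cases h32 : vk = 160
  · exact Or.inr ⟨"shift", by rw [h32]; decide, by rw [h32]; decide⟩
  by_cases h33 : vk = 161
  · exact Or.inr ⟨"shift", by rw [h33]; decide, by rw [h33]; decide⟩
  by_cases h34 : vk = 162
  · exact Or.inr ⟨"ctrl", by rw [h34]; decide, by rw [h34]; decide⟩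
  by_cases h35 : vk = 163
  · exact Or.inr ⟨"ctrl", by rw [h35]; decide, by rw [h35]; decide⟩
  by_cases h36 : vk = 164
  · exact Or.inr ⟨"alt", by rw [h36]; decide, by rw [h36]; decide⟩
  by_cases h37 : vk = 165
  · exact Or.inr ⟨"alt", by rw [h37]; decide, by rw [h37]; decide⟩
  refine Or.inl ?_
  simp only [vkName?]
  rw [if_neg h0, if_neg h1, if_neg h2, if_neg h3, if_neg h4, if_neg h5, if_neg h6, if_neg h7, if_neg h8, if_neg h9, if_neg h10, if_neg h11, if_neg h12, if_neg h13, if_neg h14, if_neg h15, if_neg h16, if_neg h17, if_neg h18, if_neg h19, if_neg h20, if_neg h21, if_neg h22, if_neg h23, if_neg h24, if_neg h25, if_neg h26, if_neg h27, if_neg h28, if_neg h29, if_neg h30, if_neg h31, if_neg h32, if_neg h33, if_neg h34, if_neg h35, if_neg h36, if_neg h37]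

lemma notMod_digit (vk : Int) (h1 : (0x30:Int) ≤ vk) (h2 : vk ≤ 0x39) :
    isModName (vkChr vk) = false := by
  interval_cases vk <;> decide

lemma notMod_letter (vk : Int) (h1 : (0x41:Int) ≤ vk) (h2 : vk ≤ 0x5A) :
    isModName (PySem.Str.lower (vkChr vk)) = false := by
  interval_cases vk <;> decide

-- move-to-front dedup (the shape B's reversed loop realises on the modifier names)
def mtf (L : List String) : List String :=
  L.foldr (fun n acc => n :: acc.filter (fun m => !(m == n))) []

-- A's state after the forward loop, in terms of the resolved-name pipeline
lemma foldA_eq (l : List Int) : ∀ m k : List String,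
    l.foldl vkStepA (m, k)
      = (((l.filterMap vkResolve).filter isModName).foldl
           (fun acc n => if n ∈ acc then acc else acc ++ [n]) m,
         k ++ (l.filterMap vkResolve).filter (fun n => !isModName n)) := by
  induction l with
  | nil => intro m k; simp
  | cons vk t ih =>
    intro m k
    rcases vk_key_cases vk with hv | ⟨n, hv, hmod⟩
    · by_cases hd : (0x30:Int) ≤ vk ∧ vk ≤ 0x39
      · have hm := notMod_digit vk hd.1 hd.2
        simp [vkStepA, hv, vkResolve, hd, hm, ih]
      · by_cases hl : (0x41:Int) ≤ vk ∧ vk ≤ 0x5A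
        · have hm := notMod_letter vk hl.1 hl.2
          simp [vkStepA, hv, vkResolve, hd, hl, hm, ih]
        · simp [vkStepA, hv, vkResolve, hd, hl, ih]
    · rcases hb : isModName n
      · simp [vkStepA, hv, vkResolve, hmod, hb, ih]
      · by_cases hnm : n ∈ m <;>
          simp [vkStepA, hv, vkResolve, hmod, hb, hnm, ih]

-- seen-list dedup with accumulator equals acc ++ (move-to-front dedup minus acc)
lemma mtf_cons (n : String) (t : List String) :
    mtf (n :: t) = n :: (mtf t).filter (fun m => !(m == n)) := rfl

lemma dedup_eq_mtf (L : List String) : ∀ acc : List String,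
    L.foldl (fun acc n => if n ∈ acc then acc else acc ++ [n]) acc
      = acc ++ (mtf L).filter (fun m => decide (m ∉ acc)) := by
  induction L with
  | nil => intro acc; simp [mtf]
  | cons n t ih =>
    intro acc
    rw [List.foldl_cons, mtf_cons, List.filter_cons]
    by_cases hn : n ∈ acc
    · rw [if_pos hn, ih]
      simp only [hn, not_true_eq_false, decide_false, Bool.false_eq_true, if_false]
      congr 1
      rw [List.filter_filter]
      apply List.filter_congr
      intro m _
      by_cases hmn : m = n
      · subst hmn; simp [hn]
      · simp [hmn]
    · rw [if_neg hn, ih]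
      simp only [hn, not_false_eq_true, decide_true, if_true]
      rw [List.append_assoc]
      congr 1
      rw [List.singleton_append]
      congr 1
      rw [List.filter_filter]
      apply List.filter_congr
      intro m _
      by_cases hmn : m = n
      · subst hmn; simp
      · simp [hmn, List.mem_append]

-- B's reversed loop, as a foldr, in terms of the same pipeline
lemma foldB_eq (l : List Int) :
    l.reverse.foldl vkGoStep ([], [])
      = (mtf ((l.filterMap vkResolve).filter isModName),
         ((l.filterMap vkResolve).filter (fun n => !isModName n)).reverse) := by
  rw [List.foldl_reverse]
  induction l with
  | nil => simp [mtf]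
  | cons vk t ih =>
    rw [List.foldr_cons, ih]
    rcases hv : vkResolve vk with _ | n
    · simp [vkGoStep, hv]
    · cases hb : isModName n
      · simp [vkGoStep, hv, hb]
      · simp [vkGoStep, hv, hb, mtf_cons]

-- ===== VERDICT (by name: the statement is the Claim_ definition above) =====
theorem vk_list_to_str_spec : Claim_equal_vk_list_to_str := by
  intro vk_codes _
  unfold Spec_vk_list_to_str vk_list_to_str vk_list_to_str_alt
  rw [foldA_eq, foldB_eq, dedup_eq_mtf]
  simp only [List.nil_append, List.reverse_reverse, List.not_mem_nil, not_false_eq_true,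
    decide_true, List.filter_true]
  split
  · next h => rw [h]; decide
  · rfl
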